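-- pv_equiv track=rewrite | github.com/HelenDun/google_foobar | gas_cloud/gas_cloud_vC.py | precol
-- ===== SOURCE A (Python) =====
-- def precol(col):
--     possib = ((0, 0), (0, 1), (1, 0), (1, 1))
--     curr = devol[col[0]]
--     for i in range(1, len(col)):
--         new = []
--         for tes in curr:
--             for comb in possib:
--                 if evol[(tes[i], comb)] == col[i]:
--                     new.append(tes+(comb,))
--         curr = tuple(new)
--     bin_ret = [tuple(zip(*i)) for i in curr]
--     return [tuple([bitlist(nu) for nu in possibl]) for possibl in bin_ret]
--
-- def bitlist(bitsl):
--     out = 0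
--     for bit in bitsl:
--         out = (out << 1) | bit
--     return out
--
-- evol = {
--             ((0, 0), (0, 0)): 0,
--             ((0, 0), (0, 1)): 1,
--             ((0, 0), (1, 0)): 1,
--             ((0, 0), (1, 1)): 0,
--             ((0, 1), (0, 0)): 1,
--             ((0, 1), (0, 1)): 0,
--             ((0, 1), (1, 0)): 0,
--             ((0, 1), (1, 1)): 0,
--             ((1, 0), (0, 0)): 1,
--             ((1, 0), (0, 1)): 0,
--             ((1, 0), (1, 0)): 0,
--             ((1, 0), (1, 1)): 0,
--             ((1, 1), (0, 0)): 0,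
--             ((1, 1), (0, 1)): 0,
--             ((1, 1), (1, 0)): 0,
--             ((1, 1), (1, 1)): 0
--         }
--
-- devol = {
--             0:(
--                 ((0, 0), (0, 0)),
--                 ((0, 0), (1, 1)),
--                 ((0, 1), (0, 1)),
--                 ((0, 1), (1, 0)),
--                 ((0, 1), (1, 1)),
--                 ((1, 0), (0, 1)),
--                 ((1, 0), (1, 0)),
--                 ((1, 0), (1, 1)),
--                 ((1, 1), (0, 0)),
--                 ((1, 1), (0, 1)),
--                 ((1, 1), (1, 0)),
--                 ((1, 1), (1, 1))
--             ),
--             1:(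
--                 ((1, 0), (0, 0)),
--                 ((0, 1), (0, 0)),
--                 ((0, 0), (1, 0)),
--                 ((0, 0), (0, 1))
--         )}
-- ===== SOURCE B (Python) =====
-- # Recursive DFS enumerator with on-the-fly bit packing; the evolution rule is
-- # computed (a cell is gas iff exactly one of its four parents was gas) instead
-- # of looked up in the 16-entry table, and no intermediate tuple layers or
-- # zip/bitlist pass are built.
--
-- DEVOL = {
--     0: (((0, 0), (0, 0)), ((0, 0), (1, 1)), ((0, 1), (0, 1)),
--         ((0, 1), (1, 0)), ((0, 1), (1, 1)), ((1, 0), (0, 1)),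
--         ((1, 0), (1, 0)), ((1, 0), (1, 1)), ((1, 1), (0, 0)),
--         ((1, 1), (0, 1)), ((1, 1), (1, 0)), ((1, 1), (1, 1))),
--     1: (((1, 0), (0, 0)), ((0, 1), (0, 0)), ((0, 0), (1, 0)),
--         ((0, 0), (0, 1))),
-- }
--
-- POSSIB = ((0, 0), (0, 1), (1, 0), (1, 1))
--
--
-- def _dfs(rest, last, x, y):
--     if not rest:
--         return [(x, y)]
--     out = []
--     for (u, v) in POSSIB:
--         if (1 if last[0] + last[1] + u + v == 1 else 0) == rest[0]:
--             out += _dfs(rest[1:], (u, v), x * 2 + u, y * 2 + v)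
--     return out
--
--
-- def precol(col):
--     res = []
--     for (a, b), (c, d) in DEVOL[col[0]]:
--         res += _dfs(col[1:], (c, d), a * 2 + c, b * 2 + d)
--     return res
-- ===== Notes on version B (the rewrite author's own statement) =====
-- stated objective: alternative
-- what changed: The layered curr/new DP that rebuilds ever-longer tuples each pass plus a final zip/bitlist packing is replaced by a recursive DFS that extends one configuration at a time, computes the evolution rule arithmetically (exactly one live parent) instead of the 16-entry table, and packs the two result integers bit-by-bit on the fly.
import Mathlib
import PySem

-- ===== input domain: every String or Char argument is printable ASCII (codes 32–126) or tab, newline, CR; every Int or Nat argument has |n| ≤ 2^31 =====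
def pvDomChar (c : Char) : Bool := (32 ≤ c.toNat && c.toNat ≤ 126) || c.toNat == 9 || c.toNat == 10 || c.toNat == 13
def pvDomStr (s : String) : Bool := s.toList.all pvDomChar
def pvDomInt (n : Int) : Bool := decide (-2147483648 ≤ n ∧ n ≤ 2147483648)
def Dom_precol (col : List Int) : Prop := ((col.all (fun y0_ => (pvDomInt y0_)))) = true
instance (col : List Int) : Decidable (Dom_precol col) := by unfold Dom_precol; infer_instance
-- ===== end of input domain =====

-- B replaces A's layered curr/new DP and final zip+bitlist packing by a recursive DFS that
-- extends one configuration at a time, computes the evolution rule arithmetically and packs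
-- the two result integers bit by bit on the fly (objective: alternative decomposition).

-- ===== PORT A =====
def possibA : List (Int × Int) := [(0, 0), (0, 1), (1, 0), (1, 1)]

def evolA : PySem.Dict ((Int × Int) × (Int × Int)) Int := PySem.Dict.ofList
  [(((0, 0), (0, 0)), 0), (((0, 0), (0, 1)), 1), (((0, 0), (1, 0)), 1), (((0, 0), (1, 1)), 0),
   (((0, 1), (0, 0)), 1), (((0, 1), (0, 1)), 0), (((0, 1), (1, 0)), 0), (((0, 1), (1, 1)), 0),
   (((1, 0), (0, 0)), 1), (((1, 0), (0, 1)), 0), (((1, 0), (1, 0)), 0), (((1, 0), (1, 1)), 0),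
   (((1, 1), (0, 0)), 0), (((1, 1), (0, 1)), 0), (((1, 1), (1, 0)), 0), (((1, 1), (1, 1)), 0)]

def devolA : PySem.Dict Int (List (List (Int × Int))) := PySem.Dict.ofList
  [(0, [[(0, 0), (0, 0)], [(0, 0), (1, 1)], [(0, 1), (0, 1)],
        [(0, 1), (1, 0)], [(0, 1), (1, 1)], [(1, 0), (0, 1)],
        [(1, 0), (1, 0)], [(1, 0), (1, 1)], [(1, 1), (0, 0)],
        [(1, 1), (0, 1)], [(1, 1), (1, 0)], [(1, 1), (1, 1)]]),
   (1, [[(1, 0), (0, 0)], [(0, 1), (0, 0)], [(0, 0), (1, 0)], [(0, 0), (0, 1)]])]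

-- bitlist: out = (out << 1) | bit  (<< 1 and | ported exactly)
def bitlistA (bitsl : List Int) : Int :=
  bitsl.foldl (fun out bit => PySem.Int.bor (out <<< (1 : Nat)) bit) 0

-- inner 'for comb in possib' loop of A (tes[i] / col[i] are always in range and the
-- evol key always present when this is reached on a Pre_precol input; defaults unreachable)
def innerA (col : List Int) (i : Int) (new : List (List (Int × Int))) (tes : List (Int × Int)) :
    List (List (Int × Int)) :=
  possibA.foldl (fun new comb =>
    if (PySem.Dict.get? evolA (PySem.List.pyGetD tes i (0, 0), comb)).getD 9 ==
        PySem.List.pyGetD col i 0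
    then new ++ [tes ++ [comb]] else new) new

-- one pass of A's outer 'for i in range(1, len(col))' loop: new = []; for tes in curr: …
def stepA (col : List Int) (curr : List (List (Int × Int))) (i : Int) :
    List (List (Int × Int)) :=
  curr.foldl (innerA col i) []

def precol (col : List Int) : List (Int × Int) :=
  -- devol[col[0]]: KeyError (dict miss / col empty) excluded by Pre_precol; default unreachable there
  let curr := (PySem.Dict.get? devolA (PySem.List.pyGetD col 0 0)).getD []
  let fin := (PySem.List.pyRange 1 (col.length : Int) 1).foldl (stepA col) curr
  let binRet := fin.map (fun i => (i.map Prod.fst, i.map Prod.snd))  -- tuple(zip(*i))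
  binRet.map (fun possibl => (bitlistA possibl.1, bitlistA possibl.2))

-- ===== PORT B =====
def possibB : List (Int × Int) := [(0, 0), (0, 1), (1, 0), (1, 1)]

def devolB (c : Int) : List ((Int × Int) × (Int × Int)) :=
  -- DEVOL[c]; KeyError for c ∉ {0,1} excluded by Pre_precol
  if c == 0 then
    [((0, 0), (0, 0)), ((0, 0), (1, 1)), ((0, 1), (0, 1)),
     ((0, 1), (1, 0)), ((0, 1), (1, 1)), ((1, 0), (0, 1)),
     ((1, 0), (1, 0)), ((1, 0), (1, 1)), ((1, 1), (0, 0)),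
     ((1, 1), (0, 1)), ((1, 1), (1, 0)), ((1, 1), (1, 1))]
  else if c == 1 then
    [((1, 0), (0, 0)), ((0, 1), (0, 0)), ((0, 0), (1, 0)), ((0, 0), (0, 1))]
  else []

def dfsB : List Int → (Int × Int) → Int → Int → List (Int × Int)
  | [], _, x, y => [(x, y)]
  | c :: rest, last, x, y =>
      possibB.foldl (fun out comb =>
        if (if last.1 + last.2 + comb.1 + comb.2 == 1 then (1 : Int) else 0) == c
        then out ++ dfsB rest comb (x * 2 + comb.1) (y * 2 + comb.2) else out) []

def precol_alt (col : List Int) : List (Int × Int) :=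
  -- col[0] / col[1:]: empty col excluded by Pre_precol
  (devolB (PySem.List.pyGetD col 0 0)).foldl (fun res s =>
    res ++ dfsB (PySem.List.slice col (some 1) none) s.2
      (s.1.1 * 2 + s.2.1) (s.1.2 * 2 + s.2.2)) []

-- ===== PRECONDITION & SPEC =====
-- Pre_ excludes exactly the inputs where A raises: an empty column (IndexError) and a
-- first element that is not a devol key (KeyError); B raises the same way there.
def Pre_precol (col : List Int) : Prop := col ≠ [] ∧ (col.headI = 0 ∨ col.headI = 1)
instance (col : List Int) : Decidable (Pre_precol col) := by unfold Pre_precol; infer_instance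
def pvWitness_precol : List Int := [1, 0, 1]

def Spec_precol (col : List Int) (out : List (Int × Int)) : Prop := out = precol_alt col
instance (col : List Int) (out : List (Int × Int)) : Decidable (Spec_precol col out) := by
  unfold Spec_precol; infer_instance

-- ===== CLAIM (what is proved, stated in full; the proofs are below) =====
def Claim_equal_precol : Prop :=
  ∀ (col : List Int), Dom_precol col → Pre_precol col → Spec_precol col (precol col)

-- ===== LEMMAS AND PROOFS =====

-- all entries of a partial configuration are bits
def Bits2 (l : List (Int × Int)) : Prop :=
  ∀ p ∈ l, (p.1 = 0 ∨ p.1 = 1) ∧ (p.2 = 0 ∨ p.2 = 1)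

-- arithmetic bit packing (what dfsB maintains incrementally)
def bl2 (bs : List Int) : Int := bs.foldl (fun o b => o * 2 + b) 0

-- what A's zip + bitlist tail computes on one configuration
def packA (tes : List (Int × Int)) : Int × Int :=
  (bitlistA (tes.map Prod.fst), bitlistA (tes.map Prod.snd))

lemma bor_two_mul (a b : Int) (ha : 0 ≤ a) (hb : b = 0 ∨ b = 1) :
    PySem.Int.bor (a <<< (1 : Nat)) b = a * 2 + b := by
  have hsh : a <<< (1 : Nat) = a * 2 := by rw [Int.shiftLeft_eq]; ring
  rcases hb with hb | hb <;> subst hb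
  · simp [hsh, pysem]
  · rw [hsh, show a * 2 = ((a.toNat * 2 : Nat) : Int) by omega,
      show (1 : Int) = ((1 : Nat) : Int) from rfl, PySem.Int.bor_natCast]
    have : a.toNat * 2 ||| 1 = a.toNat * 2 + 1 := by
      simpa [Nat.bit_val, Nat.mul_comm] using Nat.lor_bit false a.toNat true 0
    omega

lemma bitlistA_eq_bl2 (bs : List Int) (h : ∀ b ∈ bs, b = 0 ∨ b = 1) :
    bitlistA bs = bl2 bs := by
  suffices hgen : ∀ (bs : List Int) (acc : Int), 0 ≤ acc → (∀ b ∈ bs, b = 0 ∨ b = 1) →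
      bs.foldl (fun out bit => PySem.Int.bor (out <<< (1 : Nat)) bit) acc =
        bs.foldl (fun o b => o * 2 + b) acc by
    exact hgen bs 0 le_rfl h
  intro bs
  induction bs with
  | nil => intro _ _ _; rfl
  | cons b bs ih =>
    intro acc hacc hb
    have hb0 := hb b (by simp)
    simp only [List.foldl_cons]
    rw [bor_two_mul acc b hacc hb0, ih _ (by omega) (fun x hx => hb x (by simp [hx]))]

-- the 16-entry evol table IS the "exactly one live parent" rule
lemma evol_table_eq_rule (t c : Int × Int)
    (h1 : t.1 = 0 ∨ t.1 = 1) (h2 : t.2 = 0 ∨ t.2 = 1) (hc : c ∈ possibA) :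
    (PySem.Dict.get? evolA (t, c)).getD 9 =
      (if t.1 + t.2 + c.1 + c.2 == 1 then (1 : Int) else 0) := by
  obtain ⟨t1, t2⟩ := t
  obtain ⟨c1, c2⟩ := c
  simp only [possibA, List.mem_cons, List.not_mem_nil, or_false, Prod.mk.injEq] at hc
  simp only at h1 h2
  rcases h1 with h1 | h1 <;> rcases h2 with h2 | h2 <;>
    rcases hc with ⟨hc1, hc2⟩ | ⟨hc1, hc2⟩ | ⟨hc1, hc2⟩ | ⟨hc1, hc2⟩ <;>
    subst h1 <;> subst h2 <;> subst hc1 <;> subst hc2 <;> decide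

-- one layer of A as a flatMap of filtered extensions
lemma stepA_eq_flatMap (col : List Int) (i : Int) (curr : List (List (Int × Int))) :
    stepA col curr i = curr.flatMap (fun tes =>
      (possibA.filter (fun comb =>
        (PySem.Dict.get? evolA (PySem.List.pyGetD tes i (0, 0), comb)).getD 9 ==
          PySem.List.pyGetD col i 0)).map (fun comb => tes ++ [comb])) := by
  have hinner : innerA col i = fun new tes => new ++
      (possibA.filter (fun comb =>
        (PySem.Dict.get? evolA (PySem.List.pyGetD tes i (0, 0), comb)).getD 9 ==
          PySem.List.pyGetD col i 0)).map (fun comb => tes ++ [comb]) := by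
    funext new tes
    rw [innerA, PySem.List.foldl_append_if]
  rw [stepA, hinner, PySem.List.foldl_append_eq_flatMap, List.nil_append]

lemma bl2_concat (bs : List Int) (b : Int) : bl2 (bs ++ [b]) = bl2 bs * 2 + b := by
  simp [bl2, List.foldl_append]

lemma possibA_bits : ∀ c ∈ possibA, (c.1 = 0 ∨ c.1 = 1) ∧ (c.2 = 0 ∨ c.2 = 1) := by decide

lemma flatMap_filter (l : List (Int × Int)) (p : Int × Int → Bool)
    (g : Int × Int → List (Int × Int)) :
    (l.filter p).flatMap g = l.flatMap (fun x => if p x then g x else []) := by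
  induction l with
  | nil => rfl
  | cons a l ih => by_cases h : p a <;> simp [h, ih]

-- dfsB on a nonempty column as a flatMap over the four candidate parent pairs
lemma dfsB_cons (c : Int) (rest : List Int) (last : Int × Int) (x y : Int) :
    dfsB (c :: rest) last x y = possibB.flatMap (fun comb =>
      if (if last.1 + last.2 + comb.1 + comb.2 == 1 then (1 : Int) else 0) == c
      then dfsB rest comb (x * 2 + comb.1) (y * 2 + comb.2) else []) := by
  show possibB.foldl _ [] = _
  have hfun : (fun (out : List (Int × Int)) (comb : Int × Int) =>
      if (if last.1 + last.2 + comb.1 + comb.2 == 1 then (1 : Int) else 0) == c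
      then out ++ dfsB rest comb (x * 2 + comb.1) (y * 2 + comb.2) else out) =
      fun out comb => out ++
        (if (if last.1 + last.2 + comb.1 + comb.2 == 1 then (1 : Int) else 0) == c
         then dfsB rest comb (x * 2 + comb.1) (y * 2 + comb.2) else []) := by
    funext out comb; split <;> split <;> simp
  rw [hfun, PySem.List.foldl_append_eq_flatMap, List.nil_append]

-- one tes of one layer of A corresponds to one dfsB expansion step
lemma tes_step (c0 : Int) (rest : List Int) (m : Nat) (hm : m < rest.length)
    (tes : List (Int × Int)) (hlen : tes.length = m + 2) (hb : Bits2 tes) :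
    ((possibA.filter (fun comb =>
        (PySem.Dict.get? evolA (PySem.List.pyGetD tes ((m : Int) + 1) (0, 0), comb)).getD 9 ==
          PySem.List.pyGetD (c0 :: rest) ((m : Int) + 1) 0)).map
        (fun comb => tes ++ [comb])).flatMap
      (fun tes' => dfsB (rest.drop (m + 1)) (tes'.getLast?.getD (0, 0))
        (bl2 (tes'.map Prod.fst)) (bl2 (tes'.map Prod.snd)))
    = dfsB (rest.drop m) (tes.getLast?.getD (0, 0))
        (bl2 (tes.map Prod.fst)) (bl2 (tes.map Prod.snd)) := by
  have hne : tes ≠ [] := by intro h; simp [h] at hlen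
  have hlastmem : tes.getLast?.getD (0, 0) ∈ tes := by
    rw [List.getLast?_eq_some_getLast hne]; exact List.getLast_mem hne
  have hlastbits := hb _ hlastmem
  have hcast : ((m : Int) + 1) = ((m + 1 : Nat) : Int) := by push_cast; ring
  have hlast : PySem.List.pyGetD tes ((m : Int) + 1) (0, 0) = tes.getLast?.getD (0, 0) := by
    rw [hcast, PySem.List.pyGetD_natCast, List.getD_eq_getElem?_getD,
      List.getLast?_eq_getElem?, hlen]
    simp
  have hcol : PySem.List.pyGetD (c0 :: rest) ((m : Int) + 1) 0 = rest[m] := by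
    rw [hcast, PySem.List.pyGetD_natCast, List.getD_eq_getElem?_getD]
    simp [List.getElem?_cons_succ, List.getElem?_eq_getElem hm]
  rw [List.drop_eq_getElem_cons hm, dfsB_cons, List.flatMap_map, flatMap_filter]
  apply List.flatMap_congr
  intro comb hcomb
  obtain ⟨hc1, hc2⟩ := possibA_bits comb hcomb
  rw [hlast, hcol, evol_table_eq_rule _ _ hlastbits.1 hlastbits.2 hcomb]
  have hbranch : dfsB (rest.drop (m + 1)) ((tes ++ [comb]).getLast?.getD (0, 0))
      (bl2 ((tes ++ [comb]).map Prod.fst)) (bl2 ((tes ++ [comb]).map Prod.snd))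
      = dfsB (rest.drop (m + 1)) comb
        (bl2 (tes.map Prod.fst) * 2 + comb.1) (bl2 (tes.map Prod.snd) * 2 + comb.2) := by
    simp [bl2_concat]
  rw [hbranch]

-- the main loop invariant: A's remaining layers, packed at the end, are B's DFS
lemma main_loop (c0 : Int) (rest : List Int) :
    ∀ (k m : Nat) (curr : List (List (Int × Int))), rest.length - m = k →
      (∀ tes ∈ curr, tes.length = m + 2 ∧ Bits2 tes) →
      ((PySem.List.pyRange ((m : Int) + 1) ((c0 :: rest).length : Int) 1).foldl
          (stepA (c0 :: rest)) curr).map packA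
        = curr.flatMap (fun tes => dfsB (rest.drop m) (tes.getLast?.getD (0, 0))
            (bl2 (tes.map Prod.fst)) (bl2 (tes.map Prod.snd))) := by
  intro k
  induction k with
  | zero =>
    intro m curr hk hinv
    rw [PySem.List.pyRange_one_eq_nil (by simp; omega)]
    simp only [List.foldl_nil]
    rw [List.drop_eq_nil_of_le (by omega)]
    have hsing : curr.flatMap (fun tes => dfsB [] (tes.getLast?.getD (0, 0))
        (bl2 (tes.map Prod.fst)) (bl2 (tes.map Prod.snd)))
        = curr.map (fun tes => (bl2 (tes.map Prod.fst), bl2 (tes.map Prod.snd))) := by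
      exact (List.map_eq_flatMap).symm
    rw [hsing]
    apply List.map_congr_left
    intro tes htes
    have hbits := (hinv tes htes).2
    have hf : ∀ b ∈ tes.map Prod.fst, b = 0 ∨ b = 1 := by
      intro b hbm
      obtain ⟨p, hp, rfl⟩ := List.mem_map.mp hbm
      exact (hbits p hp).1
    have hs : ∀ b ∈ tes.map Prod.snd, b = 0 ∨ b = 1 := by
      intro b hbm
      obtain ⟨p, hp, rfl⟩ := List.mem_map.mp hbm
      exact (hbits p hp).2
    rw [packA, bitlistA_eq_bl2 _ hf, bitlistA_eq_bl2 _ hs]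
  | succ k ih =>
    intro m curr hk hinv
    have hm : m < rest.length := by omega
    have hinv' : ∀ tes' ∈ stepA (c0 :: rest) curr ((m : Int) + 1),
        tes'.length = (m + 1) + 2 ∧ Bits2 tes' := by
      intro tes' htes'
      rw [stepA_eq_flatMap] at htes'
      obtain ⟨tes, htes, htes'⟩ := List.mem_flatMap.mp htes'
      obtain ⟨comb, hcombf, rfl⟩ := List.mem_map.mp htes'
      have hcomb := List.mem_of_mem_filter hcombf
      obtain ⟨hl, hbits⟩ := hinv tes htes
      constructor
      · simp [hl]
      · intro p hp
        rcases List.mem_append.mp hp with hp | hp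
        · exact hbits p hp
        · simp only [List.mem_singleton] at hp
          subst hp
          exact possibA_bits p hcomb
    rw [PySem.List.pyRange_one_cons (by simp; omega)]
    simp only [List.foldl_cons]
    rw [show ((m : Int) + 1) + 1 = ((m + 1 : Nat) : Int) + 1 by push_cast; ring]
    rw [ih (m + 1) (stepA (c0 :: rest) curr ((m : Int) + 1)) (by omega) hinv']
    rw [stepA_eq_flatMap, List.flatMap_assoc]
    apply List.flatMap_congr
    intro tes htes
    exact tes_step c0 rest m hm tes (hinv tes htes).1 (hinv tes htes).2

-- ===== VERDICT (by name: the statement is the Claim_ definition above) =====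
theorem precol_spec : Claim_equal_precol := by
  intro col _hdom hpre
  obtain ⟨hne, hh⟩ := hpre
  cases col with
  | nil => exact absurd rfl hne
  | cons c0 rest =>
    simp only [List.headI] at hh
    show precol (c0 :: rest) = precol_alt (c0 :: rest)
    have hcomp : (fun possibl : List Int × List Int => (bitlistA possibl.1, bitlistA possibl.2)) ∘
        (fun i : List (Int × Int) => (i.map Prod.fst, i.map Prod.snd)) = packA := rfl
    rcases hh with rfl | rfl
    · simp only [precol, precol_alt, PySem.List.pyGetD_zero_cons, PySem.List.slice_from_one,
        List.tail_cons, List.map_map, hcomp]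
      rw [PySem.List.foldl_append_eq_flatMap, List.nil_append]
      have hseed : ((PySem.Dict.get? devolA 0).getD [] : List (List (Int × Int))) =
          [[(0, 0), (0, 0)], [(0, 0), (1, 1)], [(0, 1), (0, 1)], [(0, 1), (1, 0)], [(0, 1), (1, 1)], [(1, 0), (0, 1)], [(1, 0), (1, 0)], [(1, 0), (1, 1)], [(1, 1), (0, 0)], [(1, 1), (0, 1)], [(1, 1), (1, 0)], [(1, 1), (1, 1)]] := by decide
      have hml := main_loop 0 rest rest.length 0 ((PySem.Dict.get? devolA 0).getD [])
        (by omega) (by rw [hseed]; simp only [Bits2]; decide)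
      simp only [Nat.cast_zero, zero_add, List.drop_zero] at hml
      rw [hml, hseed]
      simp [devolB, bl2]
    · simp only [precol, precol_alt, PySem.List.pyGetD_zero_cons, PySem.List.slice_from_one,
        List.tail_cons, List.map_map, hcomp]
      rw [PySem.List.foldl_append_eq_flatMap, List.nil_append]
      have hseed : ((PySem.Dict.get? devolA 1).getD [] : List (List (Int × Int))) =
          [[(1, 0), (0, 0)], [(0, 1), (0, 0)], [(0, 0), (1, 0)], [(0, 0), (0, 1)]] := by decide
      have hml := main_loop 1 rest rest.length 0 ((PySem.Dict.get? devolA 1).getD [])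
        (by omega) (by rw [hseed]; simp only [Bits2]; decide)
      simp only [Nat.cast_zero, zero_add, List.drop_zero] at hml
      rw [hml, hseed]
      simp [devolB, bl2]
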